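-- pv_equiv track=rewrite | github.com/xiaofanc/leetcode | contest/343/2663-lexicographically-smallest-beautiful-string.py | smallestBeautifulString
-- ===== SOURCE A (Python) =====
-- def smallestBeautifulString(s: str, k: int) -> str:
--     n = len(s)
--     A = [ord(c)-ord('a') for c in s]
--     i = n-1
--     A[i] += 1
--     # find which index can be increased
--     while i >= 0:
--         if A[i] >= k:
--             i -= 1
--         elif A[i] not in A[max(i-2,0):i]: # found
--             break
--         A[i] += 1
--     if i < 0:
--         return ''
--     # A[:i+1] is beatiful, make A[i+1:] as small as possible
--     # There are only 3 possible candidates for each position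
--     for j in range(i+1, n):
--         A[j] = min({0,1,2}-set(A[max(j-2,0):j]))
--     return ''.join(chr(ord('a')+a) for a in A)
-- ===== SOURCE B (Python) =====
-- def smallestBeautifulString(s: str, k: int) -> str:
--     d = [ord(c) - 97 for c in s]
--     n = len(d)
--
--     def bump(v, a, b):
--         return v + 1 if (v == a or v == b) else v
--
--     def step(lo, a, b):
--         # smallest value >= lo avoiding a and b: two conditional bumps, no retry loop
--         return bump(bump(lo, a, b), a, b)
--
--     for i in range(n - 1, -1, -1):
--         a = d[i - 1] if i >= 1 else None
--         b = d[i - 2] if i >= 2 else None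
--         v = step(d[i] + 1, a, b)
--         if v < k:
--             break
--     else:
--         return ''
--
--     # the greedy suffix is eventually 3-periodic: compute its first three letters,
--     # then tile the period instead of filling position by position
--     c1 = step(0, v, a)
--     c2 = step(0, c1, v)
--     c3 = step(0, c2, c1)
--     m = n - i - 1
--     return ''.join(chr(97 + x) for x in d[:i] + [v] + [(c1, c2, c3)[j % 3] for j in range(m)])
-- ===== Notes on version B (the rewrite author's own statement) =====
-- stated objective: alternative
-- what changed: B replaces A's mutate-and-retry pivot loop by a branch-free closed-form candidate per position (two conditional bumps) and replaces A's per-position min-of-set-difference suffix fill by computing just the first three suffix letters and tiling that 3-periodic pattern.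
import Mathlib
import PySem

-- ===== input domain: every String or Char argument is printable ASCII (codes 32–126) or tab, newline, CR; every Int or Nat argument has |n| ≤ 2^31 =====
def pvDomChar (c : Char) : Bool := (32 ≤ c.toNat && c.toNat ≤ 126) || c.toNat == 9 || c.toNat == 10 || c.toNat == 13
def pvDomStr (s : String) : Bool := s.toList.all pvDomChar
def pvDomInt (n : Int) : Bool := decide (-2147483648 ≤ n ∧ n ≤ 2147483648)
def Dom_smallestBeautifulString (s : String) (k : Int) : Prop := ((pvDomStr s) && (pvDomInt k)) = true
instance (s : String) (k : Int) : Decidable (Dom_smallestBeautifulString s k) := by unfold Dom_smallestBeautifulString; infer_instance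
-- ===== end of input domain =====

-- B finds the pivot with a branch-free closed-form candidate per position (two conditional
-- bumps, no retry loop) and builds the suffix by tiling its 3-periodic pattern from its first
-- three letters (instead of A's per-position min-of-set-difference fill); same return value
-- wherever A returns (A raises IndexError only on the empty string).

-- ===== PORT A =====
-- [ord(c)-ord('a') for c in s]
def pvDigits (s : String) : List Int := s.toList.map (fun c => (c.toNat : Int) - 97)

-- Python "A[i] += 1" (the index may be -1 once, at the end of the search loop: Python wraps from the end)
def pvIncr (A : List Int) (i : Int) : List Int := PySem.List.pySetD A i (PySem.List.pyGetD A i 0 + 1)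

-- the "while i >= 0" search loop of A; some (A, i) is the state at "break", none is "return ''"
def pvLoopA (k : Int) (A : List Int) (i : Int) : Option (List Int × Int) :=
  if i < 0 then none
  else if PySem.List.pyGetD A i 0 ≥ k then pvLoopA k (pvIncr A (i-1)) (i-1)
  else if !(PySem.List.slice A (some (max (i-2) 0)) (some i)).contains (PySem.List.pyGetD A i 0) then
    some (A, i)
  else if i < (A.length : Int) then
    pvLoopA k (PySem.List.pySetD A i (PySem.List.pyGetD A i 0 + 1)) i
  else some (A, i)  -- in-range guard for termination only; every reachable call has i < len(A)
termination_by ((i+1).toNat, (k - PySem.List.pyGetD A i 0).toNat)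
decreasing_by
  · apply Prod.Lex.left; omega
  · apply Prod.Lex.right'
    · omega
    · have h0 : (0:Int) ≤ i := by omega
      rename_i hnl hge hc hl
      rw [PySem.List.pySetD_of_nonneg _ _ h0,
          PySem.List.pyGetD_eq_getElem _ _ h0 (by simpa using hl),
          List.getElem_set_self]
      omega

-- min({0,1,2} - set(sl)); Python's min on an empty set raises ValueError, but the difference is
-- never empty here (sl has at most two elements), so the 0 default is unreachable
def pvMinFill (sl : List Int) : Int :=
  (PySem.List.min? (PySem.Set.diff (PySem.Set.ofList [0,1,2]) (PySem.Set.ofList sl)) (fun x => x)).getD 0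

-- "for j in range(i+1, n): A[j] = min({0,1,2}-set(A[max(j-2,0):j]))"
def pvFillA (n : Int) (A : List Int) (i : Int) : List Int :=
  (PySem.List.pyRange (i+1) n).foldl
    (fun B j => PySem.List.pySetD B j (pvMinFill (PySem.List.slice B (some (max (j-2) 0)) (some j)))) A

def smallestBeautifulString (s : String) (k : Int) : String :=
  match pvLoopA k (pvIncr (pvDigits s) ((pvDigits s).length - 1)) (((pvDigits s).length : Int) - 1) with
  | none => ""
  | some (A, i) =>
    -- ''.join(chr(ord('a')+a) for a in A); all reachable values keep 97+a in chr's range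
    String.ofList ((pvFillA ((pvDigits s).length : Int) A i).map (fun a => Char.ofNat (97 + a).toNat))

-- ===== PORT B =====
-- "return v + 1 if (v == a or v == b) else v"
def pvBump (v : Int) (a b : Option Int) : Int :=
  if a = some v ∨ b = some v then v + 1 else v

-- "return bump(bump(lo, a, b), a, b)"
def pvStep (lo : Int) (a b : Option Int) : Int := pvBump (pvBump lo a b) a b

-- "for i in range(n-1, -1, -1): ... break / else: return ''"
def pvPivotB (k : Int) (L : List Int) (i : Int) : Option (Int × Int) :=
  if i < 0 then none
  else
    let a := if 1 ≤ i then some (PySem.List.pyGetD L (i-1) 0) else none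
    let b := if 2 ≤ i then some (PySem.List.pyGetD L (i-2) 0) else none
    let v := pvStep (PySem.List.pyGetD L i 0 + 1) a b
    if v < k then some (i, v) else pvPivotB k L (i-1)
termination_by (i+1).toNat
decreasing_by omega

def smallestBeautifulString_alt (s : String) (k : Int) : String :=
  match pvPivotB k (pvDigits s) (((pvDigits s).length : Int) - 1) with
  | none => ""
  | some (i, v) =>
    let d := pvDigits s
    let a := if 1 ≤ i then some (PySem.List.pyGetD d (i-1) 0) else none
    let c1 := pvStep 0 (some v) a
    let c2 := pvStep 0 (some c1) (some v)
    let c3 := pvStep 0 (some c2) (some c1)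
    let m := d.length - (i.toNat + 1)
    String.ofList ((PySem.List.slice d none (some i) ++ [v] ++
      (List.range m).map (fun j => [c1, c2, c3].getD (j % 3) 0)).map
      (fun x => Char.ofNat (97 + x).toNat))

-- ===== PRECONDITION & SPEC =====
-- Pre_ excludes only the empty string, on which A raises IndexError (A[-1] += 1 on an empty list)
def Pre_smallestBeautifulString (s : String) (k : Int) : Prop := s ≠ ""
instance (s : String) (k : Int) : Decidable (Pre_smallestBeautifulString s k) := by
  unfold Pre_smallestBeautifulString; infer_instance
def pvWitness_smallestBeautifulString : String × Int := ("cb", 4)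

def Spec_smallestBeautifulString (s : String) (k : Int) (out : String) : Prop :=
  out = smallestBeautifulString_alt s k
instance (s : String) (k : Int) (out : String) : Decidable (Spec_smallestBeautifulString s k out) := by
  unfold Spec_smallestBeautifulString; infer_instance

-- ===== CLAIM (what is proved, stated in full; the proofs are below) =====
def Claim_equal_smallestBeautifulString : Prop := ∀ (s : String) (k : Int),
  Dom_smallestBeautifulString s k → Pre_smallestBeautifulString s k →
  Spec_smallestBeautifulString s k (smallestBeautifulString s k)

-- ===== LEMMAS AND PROOFS =====

-- pyGetD at a nonnegative index is getD
lemma pv_gd (C : List Int) (i : Int) (h0 : 0 ≤ i) :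
    PySem.List.pyGetD C i 0 = C.getD i.toNat 0 := by
  simp [PySem.List.pyGetD, PySem.List.pyGet?_of_nonneg _ h0, List.getD_eq_getElem?_getD]

-- proof-side model of A's inner retry loop: smallest v' ≥ v with v' ≥ k or v' non-conflicting
def pvScanV (k : Int) (p1 p2 : Option Int) (v : Int) : Int :=
  if v < k ∧ (p1 = some v ∨ p2 = some v) then pvScanV k p1 p2 (v+1) else v
termination_by (1 + max (p1.getD 0) (p2.getD 0) - v).toNat
decreasing_by
  rename_i h
  rcases h with ⟨-, h | h⟩ <;> subst h <;> simp <;> omega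

-- proof-side pivot search over pvScanV (a restatement of A's outer loop on the untouched list)
def pvPivotScan (k : Int) (L : List Int) (i : Int) : Option (Int × Int) :=
  if i < 0 then none
  else
    let p1 := if 1 ≤ i then some (PySem.List.pyGetD L (i-1) 0) else none
    let p2 := if 2 ≤ i then some (PySem.List.pyGetD L (i-2) 0) else none
    let v := pvScanV k p1 p2 (PySem.List.pyGetD L i 0 + 1)
    if v < k then some (i, v) else pvPivotScan k L (i-1)
termination_by (i+1).toNat
decreasing_by omega

-- proof-side model of the greedy fill: count up from 0 past the last two letters
def pvCFill (p1 p2 : Option Int) (c : Int) : Int :=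
  if p1 = some c ∨ p2 = some c then pvCFill p1 p2 (c+1) else c
termination_by (1 + max (p1.getD 0) (p2.getD 0) - c).toNat
decreasing_by
  rename_i h
  rcases h with h | h <;> subst h <;> simp <;> omega

-- the previous-two reads of the append-style fill
def pvLast1 (out : List Int) : Option Int :=
  if 1 ≤ out.length then some (PySem.List.pyGetD out ((out.length : Int) - 1) 0) else none
def pvLast2 (out : List Int) : Option Int :=
  if 2 ≤ out.length then some (PySem.List.pyGetD out ((out.length : Int) - 2) 0) else none

-- proof-side append-style fill (intermediate between A's indexed fill and B's tiling)
def pvFillB (n : Nat) (out : List Int) : List Int :=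
  if out.length < n then
    pvFillB n (out ++ [pvCFill (pvLast1 out) (pvLast2 out) 0])
  else out
termination_by n - out.length
decreasing_by simp; omega

-- the stream of letters the append-style fill emits from a given last-two state
def pvGen (p2 p1 : Option Int) (m : Nat) : List Int :=
  match m with
  | 0 => []
  | m + 1 =>
    let c := pvCFill p1 p2 0
    c :: pvGen p1 (some c) m

lemma pv_scan_stop {k v : Int} {p1 p2 : Option Int}
    (h : ¬ (v < k ∧ (p1 = some v ∨ p2 = some v))) : pvScanV k p1 p2 v = v := by
  rw [pvScanV.eq_def]; simp only [if_neg h]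

lemma pv_scan_step {k v : Int} {p1 p2 : Option Int}
    (h : v < k ∧ (p1 = some v ∨ p2 = some v)) : pvScanV k p1 p2 v = pvScanV k p1 p2 (v+1) := by
  rw [pvScanV.eq_def]; simp only [if_pos h]

lemma pv_cf_stop {p1 p2 : Option Int} {c : Int} (h : ¬ (p1 = some c ∨ p2 = some c)) :
    pvCFill p1 p2 c = c := by
  rw [pvCFill.eq_def]; simp only [if_neg h]

lemma pv_cf_step {p1 p2 : Option Int} {c : Int} (h : p1 = some c ∨ p2 = some c) :
    pvCFill p1 p2 c = pvCFill p1 p2 (c+1) := by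
  rw [pvCFill.eq_def]; simp only [if_pos h]

-- the two conditional bumps, written as a nested case split
lemma pv_step_eq (lo : Int) (a b : Option Int) :
    pvStep lo a b =
      if a = some lo ∨ b = some lo then
        (if a = some (lo + 1) ∨ b = some (lo + 1) then lo + 2 else lo + 1)
      else lo := by
  unfold pvStep pvBump
  by_cases h1 : a = some lo ∨ b = some lo
  · simp only [if_pos h1]
    by_cases h2 : a = some (lo + 1) ∨ b = some (lo + 1)
    · simp only [if_pos h2]; ring
    · simp only [if_neg h2]
  · simp only [if_neg h1]

-- the closed-form candidate never collides with either forbidden letter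
lemma pv_step_avoid (lo : Int) (a b : Option Int) :
    a ≠ some (pvStep lo a b) ∧ b ≠ some (pvStep lo a b) := by
  rw [pv_step_eq]
  split_ifs with h1 h2
  · constructor <;> intro h <;> rcases h1 with h1 | h1 <;> rcases h2 with h2 | h2 <;>
      simp_all <;> omega
  · exact ⟨fun h => h2 (Or.inl h), fun h => h2 (Or.inr h)⟩
  · exact ⟨fun h => h1 (Or.inl h), fun h => h1 (Or.inr h)⟩

lemma pv_step_range (lo : Int) (a b : Option Int) :
    pvStep lo a b = lo ∨ pvStep lo a b = lo + 1 ∨ pvStep lo a b = lo + 2 := by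
  rw [pv_step_eq]
  split_ifs <;> omega

-- A's retry scan agrees with the closed form below k …
lemma pv_scan_eq_step {k lo : Int} {a b : Option Int} (h : pvStep lo a b < k) :
    pvScanV k a b lo = pvStep lo a b := by
  have hav := pv_step_avoid lo a b
  rw [pv_step_eq] at h hav ⊢
  split_ifs at h hav ⊢ with h1 h2
  · rw [pv_scan_step ⟨by omega, h1⟩, pv_scan_step ⟨by omega, h2⟩,
        show lo + 1 + 1 = lo + 2 by ring, pv_scan_stop]
    rintro ⟨-, hc | hc⟩
    · exact hav.1 hc
    · exact hav.2 hc
  · rw [pv_scan_step ⟨by omega, h1⟩, pv_scan_stop]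
    rintro ⟨-, hc⟩
    exact h2 hc
  · rw [pv_scan_stop]
    rintro ⟨-, hc⟩
    exact h1 hc

-- … and stays at or above k when the closed form is
lemma pv_scan_ge {k lo : Int} {a b : Option Int} (h : k ≤ pvStep lo a b) :
    k ≤ pvScanV k a b lo := by
  rw [pv_step_eq] at h
  split_ifs at h with h1 h2
  · rcases lt_or_ge lo k with hl | hl
    · rw [pv_scan_step ⟨hl, h1⟩]
      rcases lt_or_ge (lo + 1) k with hl2 | hl2
      · rw [pv_scan_step ⟨hl2, h2⟩, pv_scan_stop (by intro hh; omega)]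
        omega
      · rw [pv_scan_stop (by intro hh; omega)]; omega
    · rw [pv_scan_stop (by intro hh; omega)]; omega
  · rcases lt_or_ge lo k with hl | hl
    · rw [pv_scan_step ⟨hl, h1⟩, pv_scan_stop (by intro hh; exact h2 hh.2)]
      omega
    · rw [pv_scan_stop (by intro hh; omega)]; omega
  · rw [pv_scan_stop (by intro hh; exact h1 hh.2)]; omega

-- the scan pivot and B's closed-form pivot coincide
lemma pv_pivot_eq_aux (k : Int) (L : List Int) : ∀ (n : Nat) (i : Int), (i+1).toNat ≤ n →
    pvPivotScan k L i = pvPivotB k L i := by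
  intro n
  induction n with
  | zero =>
    intro i hi
    rw [pvPivotScan.eq_def, pvPivotB.eq_def, if_pos (by omega), if_pos (by omega)]
  | succ n ih =>
    intro i hi
    rcases lt_or_ge i 0 with h0 | h0
    · rw [pvPivotScan.eq_def, pvPivotB.eq_def, if_pos h0, if_pos h0]
    · rw [pvPivotScan.eq_def, pvPivotB.eq_def]
      simp only [if_neg (show ¬ i < 0 from by omega)]
      set a := (if 1 ≤ i then some (PySem.List.pyGetD L (i-1) 0) else none) with ha
      set b := (if 2 ≤ i then some (PySem.List.pyGetD L (i-2) 0) else none) with hb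
      rcases lt_or_ge (pvStep (PySem.List.pyGetD L i 0 + 1) a b) k with hs | hs
      · rw [pv_scan_eq_step hs]
        simp only [if_pos hs]
      · rw [if_neg (show ¬ pvScanV k a b (PySem.List.pyGetD L i 0 + 1) < k from by
              have := pv_scan_ge hs; omega),
            if_neg (show ¬ pvStep (PySem.List.pyGetD L i 0 + 1) a b < k from by omega)]
        exact ih (i-1) (by omega)

lemma pv_pivot_eq (k : Int) (L : List Int) (i : Int) : pvPivotScan k L i = pvPivotB k L i :=
  pv_pivot_eq_aux k L (i+1).toNat i le_rfl

-- the count-up fill letter equals the closed form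
lemma pv_cfill_eq_step (p1 p2 : Option Int) (lo : Int) : pvCFill p1 p2 lo = pvStep lo p1 p2 := by
  have hav := pv_step_avoid lo p1 p2
  rw [pv_step_eq] at hav ⊢
  split_ifs at hav ⊢ with h1 h2
  · rw [pv_cf_step h1, pv_cf_step h2, show lo + 1 + 1 = lo + 2 by ring,
        pv_cf_stop (by rintro (hc | hc); exacts [hav.1 hc, hav.2 hc])]
  · rw [pv_cf_step h1, pv_cf_stop h2]
  · rw [pv_cf_stop h1]

lemma pv_step0_mem (a b : Option Int) :
    pvStep 0 a b = 0 ∨ pvStep 0 a b = 1 ∨ pvStep 0 a b = 2 := by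
  have := pv_step_range 0 a b
  omega

-- avoiding two of three distinct letters of {0,1,2} yields the third
lemma pv_rot (x y z : Int)
    (hx : x = 0 ∨ x = 1 ∨ x = 2) (hy : y = 0 ∨ y = 1 ∨ y = 2) (hz : z = 0 ∨ z = 1 ∨ z = 2)
    (hyx : y ≠ x) (hzx : z ≠ x) (hzy : z ≠ y) :
    pvStep 0 (some z) (some y) = x := by
  rcases hx with rfl | rfl | rfl <;> rcases hy with rfl | rfl | rfl <;>
    rcases hz with rfl | rfl | rfl <;> first | omega | decide

-- ''fill from the last-two state'' equals B's tiled 3-periodic pattern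
lemma pv_gen_tile (a : Option Int) (v : Int) (m : Nat) :
    pvGen a (some v) m =
      (List.range m).map (fun j =>
        [pvStep 0 (some v) a,
         pvStep 0 (some (pvStep 0 (some v) a)) (some v),
         pvStep 0 (some (pvStep 0 (some (pvStep 0 (some v) a)) (some v))) (some (pvStep 0 (some v) a))].getD (j % 3) 0) := by
  set c1 := pvStep 0 (some v) a with hc1
  set c2 := pvStep 0 (some c1) (some v) with hc2
  set c3 := pvStep 0 (some c2) (some c1) with hc3
  have h1m := pv_step0_mem (some v) a
  have h2m := pv_step0_mem (some c1) (some v)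
  have h3m := pv_step0_mem (some c2) (some c1)
  rw [← hc1] at h1m
  rw [← hc2] at h2m
  rw [← hc3] at h3m
  have h21 : c2 ≠ c1 := by
    have := (pv_step_avoid 0 (some c1) (some v)).1
    rw [← hc2] at this
    intro h; exact this (by rw [h])
  have h31 : c3 ≠ c1 := by
    have := (pv_step_avoid 0 (some c2) (some c1)).2
    rw [← hc3] at this
    intro h; exact this (by rw [h])
  have h32 : c3 ≠ c2 := by
    have := (pv_step_avoid 0 (some c2) (some c1)).1
    rw [← hc3] at this
    intro h; exact this (by rw [h])
  have rot1 : pvStep 0 (some c3) (some c2) = c1 := pv_rot c1 c2 c3 h1m h2m h3m h21 h31 h32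
  have rot2 : pvStep 0 (some c1) (some c3) = c2 :=
    pv_rot c2 c3 c1 h2m h3m h1m h32 (Ne.symm h21) (Ne.symm h31)
  -- the periodic core, from the recurring state (c2, c3)
  have core : ∀ r : Nat, pvGen (some c2) (some c3) r =
      (List.range r).map (fun j => [c1, c2, c3].getD (j % 3) 0) := by
    intro r
    induction r using Nat.strong_induction_on with
    | _ r ih =>
      match r with
      | 0 => simp [pvGen]
      | 1 => simp [pvGen, pv_cfill_eq_step, rot1, List.range_succ]
      | 2 =>
        simp [pvGen, pv_cfill_eq_step, rot1, rot2, List.range_succ]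
      | (r + 3) =>
        show pvGen (some c2) (some c3) (r + 3) = _
        have e1 : pvGen (some c2) (some c3) (r + 3)
            = c1 :: c2 :: c3 :: pvGen (some c2) (some c3) r := by
          simp only [pvGen, pv_cfill_eq_step, rot1, rot2, ← hc3]
        rw [e1, ih r (by omega)]
        rw [show r + 3 = 3 + r by omega, List.range_add]
        simp [List.range_succ, Nat.add_mod_left]
    
  -- unfold the first three emitted letters, then apply the core
  match m with
  | 0 => simp [pvGen]
  | 1 => simp [pvGen, pv_cfill_eq_step, List.range_succ, ← hc1]
  | 2 => simp [pvGen, pv_cfill_eq_step, List.range_succ, ← hc1, ← hc2]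
  | (m + 3) =>
    have e1 : pvGen a (some v) (m + 3) = c1 :: c2 :: c3 :: pvGen (some c2) (some c3) m := by
      simp only [pvGen, pv_cfill_eq_step, ← hc1, ← hc2, ← hc3]
    rw [e1, core m, show m + 3 = 3 + m by omega, List.range_add]
    simp [List.range_succ, Nat.add_mod_left]

-- appending one letter shifts the last-two state
lemma pv_last1_append (out : List Int) (c : Int) : pvLast1 (out ++ [c]) = some c := by
  unfold pvLast1
  have hlen : (out ++ [c]).length = out.length + 1 := by simp
  rw [if_pos (by omega), pv_gd _ _ (by rw [hlen]; push_cast; omega)]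
  congr 1
  rw [show ((((out ++ [c]).length : Int)) - 1).toNat = out.length by rw [hlen]; push_cast; omega]
  rw [List.getD_eq_getElem?_getD, List.getElem?_append_right (by omega)]
  simp

lemma pv_last2_append (out : List Int) (c : Int) : pvLast2 (out ++ [c]) = pvLast1 out := by
  unfold pvLast2 pvLast1
  have hlen : (out ++ [c]).length = out.length + 1 := by simp
  rcases Nat.lt_or_ge out.length 1 with h1 | h1
  · rw [if_neg (by omega), if_neg (by omega)]
  · rw [if_pos (by omega), if_pos (by omega)]
    rw [pv_gd _ _ (by rw [hlen]; push_cast; omega), pv_gd _ _ (by push_cast; omega)]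
    congr 1
    rw [show ((((out ++ [c]).length : Int)) - 2).toNat = out.length - 1 by rw [hlen]; push_cast; omega,
        show (((out.length : Int)) - 1).toNat = out.length - 1 by push_cast; omega]
    rw [List.getD_eq_getElem?_getD, List.getD_eq_getElem?_getD,
        List.getElem?_append_left (by omega)]

-- the append-style fill emits exactly pvGen from its last-two state
lemma pv_fillB_gen (n : Nat) : ∀ (fuel : Nat) (out : List Int), out.length + fuel = n →
    pvFillB n out = out ++ pvGen (pvLast2 out) (pvLast1 out) fuel := by
  intro fuel
  induction fuel with
  | zero =>
    intro out hlen
    rw [pvFillB.eq_def, if_neg (by omega)]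
    simp [pvGen]
  | succ fuel ih =>
    intro out hlen
    rw [pvFillB.eq_def, if_pos (by omega)]
    rw [ih (out ++ [pvCFill (pvLast1 out) (pvLast2 out) 0]) (by simp; omega),
        pv_last1_append, pv_last2_append]
    simp [pvGen]

-- the previous-two-letters pair read by both programs, over the untouched prefix
def pvPrev1 (L : List Int) (i : Int) : Option Int :=
  if 1 ≤ i then some (L.getD (i.toNat - 1) 0) else none
def pvPrev2 (L : List Int) (i : Int) : Option Int :=
  if 2 ≤ i then some (L.getD (i.toNat - 2) 0) else none

-- A's slice A[max(i-2,0):i] written out elementwise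
lemma pv_slice_pair (C : List Int) (i : Int) (h0 : 0 ≤ i) (hl : i ≤ (C.length : Int)) :
    PySem.List.slice C (some (max (i-2) 0)) (some i) =
      (if 2 ≤ i then [C.getD (i.toNat - 2) 0, C.getD (i.toNat - 1) 0]
       else if 1 ≤ i then [C.getD 0 0] else []) := by
  rcases lt_or_ge i 1 with h1 | h1
  · have hi : i = 0 := by omega
    subst hi
    rw [PySem.List.slice_toNat _ (by omega) (by omega)]
    simp
  rcases lt_or_ge i 2 with h2 | h2
  · have hi : i = 1 := by omega
    subst hi
    rw [PySem.List.slice_toNat _ (by omega) (by omega)]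
    have hb : 0 < C.length := by omega
    rw [show max (1-2 : Int) 0 = 0 by omega]
    rw [if_neg (by omega : ¬ (2:Int) ≤ 1), if_pos (le_refl (1:Int))]
    rw [show (1:Int).toNat - (0:Int).toNat = 1 by omega, Int.toNat_zero, List.drop_zero]
    cases C with
    | nil => simp at hb
    | cons a t => simp
  · have e2 : (i-2).toNat = i.toNat - 2 := by omega
    have hb1 : i.toNat - 2 < C.length := by omega
    have hb2 : i.toNat - 1 < C.length := by omega
    rw [show max (i-2) 0 = i - 2 by omega, PySem.List.slice_toNat _ (by omega) (by omega)]
    rw [e2, show i.toNat - (i.toNat - 2) = 2 by omega]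
    rw [if_pos h2]
    rw [List.drop_eq_getElem_cons hb1,
        List.drop_eq_getElem_cons (by omega : i.toNat - 2 + 1 < C.length),
        List.take_succ_cons, List.take_succ_cons, List.take_zero]
    rw [List.getD_eq_getElem _ _ hb1, List.getD_eq_getElem _ _ hb2]
    simp [show i.toNat - 2 + 1 = i.toNat - 1 by omega]

-- pvPivotScan, one step, with the reads normalised to getD
lemma pv_pivotScan_unfold (k : Int) (L : List Int) (i : Int) (h0 : 0 ≤ i) :
    pvPivotScan k L i =
      (if pvScanV k (pvPrev1 L i) (pvPrev2 L i) (L.getD i.toNat 0 + 1) < k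
       then some (i, pvScanV k (pvPrev1 L i) (pvPrev2 L i) (L.getD i.toNat 0 + 1))
       else pvPivotScan k L (i-1)) := by
  rw [pvPivotScan.eq_def]
  have e1 : (if 1 ≤ i then some (PySem.List.pyGetD L (i-1) 0) else none) = pvPrev1 L i := by
    unfold pvPrev1
    split_ifs with h
    · rw [pv_gd _ _ (by omega)]; congr 2; omega
    · rfl
  have e2 : (if 2 ≤ i then some (PySem.List.pyGetD L (i-2) 0) else none) = pvPrev2 L i := by
    unfold pvPrev2
    split_ifs with h
    · rw [pv_gd _ _ (by omega)]; congr 2; omega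
    · rfl
  simp only [if_neg (by omega : ¬ i < 0), e1, e2, pv_gd L i h0]

-- the invariant carried through the pivot search
def pvRel (L : List Int) : Option (List Int × Int) → Option (Int × Int) → Prop
  | none, none => True
  | some (C, i), some (i', w) =>
      i = i' ∧ 0 ≤ i ∧ i < (L.length : Int) ∧ C.length = L.length ∧
      C.take (i.toNat + 1) = L.take i.toNat ++ [w]
  | _, _ => False

lemma pv_getD_set_self (C : List Int) (m : Nat) (v : Int) (h : m < C.length) :
    (C.set m v).getD m 0 = v := by
  simp [List.getD_eq_getElem?_getD, List.getElem?_set, h]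

lemma pv_getD_set_ne (C : List Int) (m j : Nat) (v : Int) (h : j ≠ m) :
    (C.set m v).getD j 0 = C.getD j 0 := by
  simp [List.getD_eq_getElem?_getD, List.getElem?_set, (Ne.symm h)]

lemma pv_take_succ {C L : List Int} {m : Nat} {w : Int} (hm : m < L.length)
    (hlen : C.length = L.length) (hag : ∀ j : Nat, j < m → C.getD j 0 = L.getD j 0)
    (hw : C.getD m 0 = w) : C.take (m+1) = L.take m ++ [w] := by
  apply List.ext_getElem
  · simp; omega
  · intro j hj1 hj2
    simp only [List.length_take] at hj1
    have hjC : j < C.length := by omega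
    rcases lt_or_ge j m with hc | hc
    · rw [List.getElem_take, List.getElem_append_left (by simp; omega)]
      rw [List.getElem_take]
      have := hag j hc
      rwa [List.getD_eq_getElem _ _ hjC, List.getD_eq_getElem _ _ (by omega)] at this
    · have hj : j = m := by omega
      subst hj
      rw [List.getD_eq_getElem _ _ hjC] at hw
      simp [List.getElem_take, List.getElem_append, show min j L.length = j by omega, hw]

-- membership in the slice pair, in terms of pvPrev1/pvPrev2 over L
lemma pv_conflict_iff {C L : List Int} {i a : Int} (h0 : 0 ≤ i) (hl : i ≤ (C.length : Int))
    (hlen : C.length = L.length) (hag : ∀ j : Nat, (j : Int) < i → C.getD j 0 = L.getD j 0) :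
    (PySem.List.slice C (some (max (i-2) 0)) (some i)).contains a = true ↔
      (pvPrev1 L i = some a ∨ pvPrev2 L i = some a) := by
  rw [pv_slice_pair C i h0 hl]
  unfold pvPrev1 pvPrev2
  rcases lt_or_ge i 1 with h1 | h1
  · simp [if_neg (by omega : ¬ (2:Int) ≤ i), if_neg (by omega : ¬ (1:Int) ≤ i)]
  rcases lt_or_ge i 2 with h2 | h2
  · have hi : i = 1 := by omega
    subst hi
    rw [hag 0 (by omega)]
    simp only [if_neg (by omega : ¬ (2:Int) ≤ 1), if_pos (by omega : (1:Int) ≤ 1)]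
    simp
    exact eq_comm
  · rw [if_pos h2, if_pos (by omega : (1:Int) ≤ i), if_pos h2]
    rw [hag (i.toNat - 2) (by omega : ((i.toNat - 2 : Nat) : Int) < i),
        hag (i.toNat - 1) (by omega : ((i.toNat - 1 : Nat) : Int) < i)]
    simp
    constructor <;> rintro (h|h) <;> simp [h]

-- the pivot phases of A and the scan pivot agree
lemma pv_pivot_core (k : Int) (C : List Int) (i : Int) :
    ∀ L : List Int, C.length = L.length → 0 ≤ i → i < (L.length : Int) →
    (∀ j : Nat, (j : Int) < i → C.getD j 0 = L.getD j 0) →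
    pvScanV k (pvPrev1 L i) (pvPrev2 L i) (C.getD i.toNat 0) =
      pvScanV k (pvPrev1 L i) (pvPrev2 L i) (L.getD i.toNat 0 + 1) →
    pvRel L (pvLoopA k C i) (pvPivotScan k L i) := by
  fun_induction pvLoopA k C i with
  | case1 C i hneg => intro L _ h0 _ _ _; omega
  | case2 C i hneg hge ih =>
    intro L hlen h0 hil hag hscan
    rw [pv_gd C i h0] at hge
    have hstop : pvScanV k (pvPrev1 L i) (pvPrev2 L i) (L.getD i.toNat 0 + 1) = C.getD i.toNat 0 := by
      rw [← hscan]
      exact pv_scan_stop (by intro h; omega)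
    rw [pv_pivotScan_unfold k L i h0, if_neg (by omega)]
    rcases lt_or_ge i 1 with h1 | h1
    · have hi : i = 0 := by omega
      subst hi
      rw [pvLoopA.eq_def, pvPivotScan.eq_def]
      norm_num
      trivial
    · have hm : (i-1).toNat < C.length := by omega
      have hincr : pvIncr C (i-1) = C.set (i-1).toNat (C.getD (i-1).toNat 0 + 1) := by
        unfold pvIncr
        rw [PySem.List.pySetD_of_nonneg _ _ (by omega), pv_gd _ _ (by omega)]
      apply ih L
      · rw [hincr]; simpa using hlen
      · omega
      · omega
      · intro j hj
        rw [hincr, pv_getD_set_ne _ _ _ _ (by omega)]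
        exact hag j (by omega)
      · rw [hincr, pv_getD_set_self _ _ _ hm]
        rw [show (i-1).toNat = (i-1).toNat from rfl, hag (i-1).toNat (by omega)]
  | case3 C i hneg hge hnc =>
    intro L hlen h0 hil hag hscan
    rw [pv_gd C i h0] at hge hnc
    have hl : i ≤ (C.length : Int) := by omega
    have hnc' : ¬ (pvPrev1 L i = some (C.getD i.toNat 0) ∨ pvPrev2 L i = some (C.getD i.toNat 0)) := by
      rw [← pv_conflict_iff h0 hl hlen hag]
      simpa using hnc
    have hstop : pvScanV k (pvPrev1 L i) (pvPrev2 L i) (L.getD i.toNat 0 + 1) = C.getD i.toNat 0 := by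
      rw [← hscan]
      exact pv_scan_stop (by intro h; exact hnc' h.2)
    rw [pv_pivotScan_unfold k L i h0, if_pos (by omega), hstop]
    exact ⟨rfl, h0, hil, hlen,
      pv_take_succ (by omega) hlen (fun j hj => hag j (by omega)) rfl⟩
  | case4 C i hneg hge hnc hin ih =>
    intro L hlen h0 hil hag hscan
    rw [pv_gd C i h0] at hge hnc
    have hl : i ≤ (C.length : Int) := by omega
    have hc' : pvPrev1 L i = some (C.getD i.toNat 0) ∨ pvPrev2 L i = some (C.getD i.toNat 0) := by
      rw [← pv_conflict_iff h0 hl hlen hag]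
      simpa using hnc
    have hset : PySem.List.pySetD C i (PySem.List.pyGetD C i 0 + 1)
        = C.set i.toNat (C.getD i.toNat 0 + 1) := by
      rw [PySem.List.pySetD_of_nonneg _ _ h0, pv_gd _ _ h0]
    apply ih L
    · rw [hset]; simpa using hlen
    · exact h0
    · exact hil
    · intro j hj
      rw [hset, pv_getD_set_ne _ _ _ _ (by omega)]
      exact hag j hj
    · rw [hset, pv_getD_set_self _ _ _ (by omega)]
      rw [← pv_scan_step ⟨by omega, hc'⟩]
      exact hscan
  | case5 C i hneg hge hnc hin =>
    intro L hlen h0 hil hag hscan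
    exact absurd (by omega : i < (C.length : Int)) hin

-- min({0,1,2} - {x,y}) is the count-up letter, by the shape of the previous-two pair
lemma pv_fill_val_00 : pvCFill none none 0 = pvMinFill [] := by
  rw [pv_cf_stop (by simp)]
  rfl

lemma pv_fill_val_10 (x : Int) : pvCFill (some x) none 0 = pvMinFill [x] := by
  have hmf : pvMinFill [x] =
      (PySem.List.min? ([0,1,2].filter (fun z => !decide (z = x))) (fun v => v)).getD 0 := by
    unfold pvMinFill PySem.Set.diff
    congr 1
    apply congrArg (fun l => PySem.List.min? l _)
    apply List.filter_congr
    intro z _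
    simp [PySem.Set.contains]
  rw [hmf]
  by_cases h0 : x = 0
  · subst h0
    rw [pv_cf_step (by simp), pv_cf_stop (by simp)]
    norm_num [PySem.List.min?]
  · by_cases h1 : x = 1
    · subst h1
      rw [pv_cf_stop (by simp)]
      norm_num [PySem.List.min?]
    · by_cases h2 : x = 2
      · subst h2
        rw [pv_cf_stop (by simp)]
        norm_num [PySem.List.min?]
      · rw [pv_cf_stop (by simp [h0])]
        norm_num [PySem.List.min?, Ne.symm h0, Ne.symm h1, Ne.symm h2]

lemma pv_fill_val_11 (x y : Int) : pvCFill (some x) (some y) 0 = pvMinFill [y, x] := by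
  have hmf : pvMinFill [y, x] =
      (PySem.List.min? ([0,1,2].filter (fun z => !decide (z = y ∨ z = x))) (fun v => v)).getD 0 := by
    unfold pvMinFill PySem.Set.diff
    congr 1
    apply congrArg (fun l => PySem.List.min? l _)
    apply List.filter_congr
    intro z _
    simp [PySem.Set.contains]
  rw [hmf]
  by_cases hx0 : x = 0 <;> by_cases hx1 : x = 1 <;> by_cases hx2 : x = 2 <;>
  by_cases hy0 : y = 0 <;> by_cases hy1 : y = 1 <;> by_cases hy2 : y = 2 <;>
  first
  | omega
  | (rw [pv_cf_step (p1 := some x) (p2 := some y) (c := 0) (by simp [hx0, hy0])]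
     rw [(by norm_num : ((0:Int)+1) = 1)]
     rw [pv_cf_stop (p1 := some x) (p2 := some y) (c := 1) (by simp [hx0, hy0])]
     norm_num [PySem.List.min?, hx0, hy0]
     done)
  | (rw [pv_cf_step (p1 := some x) (p2 := some y) (c := 0) (by simp [hx0, hy1])]
     rw [(by norm_num : ((0:Int)+1) = 1)]
     rw [pv_cf_step (p1 := some x) (p2 := some y) (c := 1) (by simp [hx0, hy1])]
     rw [(by norm_num : ((1:Int)+1) = 2)]
     rw [pv_cf_stop (p1 := some x) (p2 := some y) (c := 2) (by simp [hx0, hy1])]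
     norm_num [PySem.List.min?, hx0, hy1]
     done)
  | (rw [pv_cf_step (p1 := some x) (p2 := some y) (c := 0) (by simp [hx0, hy2])]
     rw [(by norm_num : ((0:Int)+1) = 1)]
     rw [pv_cf_stop (p1 := some x) (p2 := some y) (c := 1) (by simp [hx0, hy2])]
     norm_num [PySem.List.min?, hx0, hy2]
     done)
  | (rw [pv_cf_step (p1 := some x) (p2 := some y) (c := 0) (by simp [hx0, hy0, Ne.symm hy0, hy1, Ne.symm hy1, hy2, Ne.symm hy2])]
     rw [(by norm_num : ((0:Int)+1) = 1)]
     rw [pv_cf_stop (p1 := some x) (p2 := some y) (c := 1) (by simp [hx0, hy0, Ne.symm hy0, hy1, Ne.symm hy1, hy2, Ne.symm hy2])]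
     norm_num [PySem.List.min?, hx0, hy0, Ne.symm hy0, hy1, Ne.symm hy1, hy2, Ne.symm hy2]
     done)
  | (rw [pv_cf_step (p1 := some x) (p2 := some y) (c := 0) (by simp [hx1, hy0])]
     rw [(by norm_num : ((0:Int)+1) = 1)]
     rw [pv_cf_step (p1 := some x) (p2 := some y) (c := 1) (by simp [hx1, hy0])]
     rw [(by norm_num : ((1:Int)+1) = 2)]
     rw [pv_cf_stop (p1 := some x) (p2 := some y) (c := 2) (by simp [hx1, hy0])]
     norm_num [PySem.List.min?, hx1, hy0]
     done)
  | (rw [pv_cf_stop (p1 := some x) (p2 := some y) (c := 0) (by simp [hx1, hy1])]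
     norm_num [PySem.List.min?, hx1, hy1]
     done)
  | (rw [pv_cf_stop (p1 := some x) (p2 := some y) (c := 0) (by simp [hx1, hy2])]
     norm_num [PySem.List.min?, hx1, hy2]
     done)
  | (rw [pv_cf_stop (p1 := some x) (p2 := some y) (c := 0) (by simp [hx1, hy0, Ne.symm hy0, hy1, Ne.symm hy1, hy2, Ne.symm hy2])]
     norm_num [PySem.List.min?, hx1, hy0, Ne.symm hy0, hy1, Ne.symm hy1, hy2, Ne.symm hy2]
     done)
  | (rw [pv_cf_step (p1 := some x) (p2 := some y) (c := 0) (by simp [hx2, hy0])]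
     rw [(by norm_num : ((0:Int)+1) = 1)]
     rw [pv_cf_stop (p1 := some x) (p2 := some y) (c := 1) (by simp [hx2, hy0])]
     norm_num [PySem.List.min?, hx2, hy0]
     done)
  | (rw [pv_cf_stop (p1 := some x) (p2 := some y) (c := 0) (by simp [hx2, hy1])]
     norm_num [PySem.List.min?, hx2, hy1]
     done)
  | (rw [pv_cf_stop (p1 := some x) (p2 := some y) (c := 0) (by simp [hx2, hy2])]
     norm_num [PySem.List.min?, hx2, hy2]
     done)
  | (rw [pv_cf_stop (p1 := some x) (p2 := some y) (c := 0) (by simp [hx2, hy0, Ne.symm hy0, hy1, Ne.symm hy1, hy2, Ne.symm hy2])]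
     norm_num [PySem.List.min?, hx2, hy0, Ne.symm hy0, hy1, Ne.symm hy1, hy2, Ne.symm hy2]
     done)
  | (rw [pv_cf_step (p1 := some x) (p2 := some y) (c := 0) (by simp [hx0, Ne.symm hx0, hx1, Ne.symm hx1, hx2, Ne.symm hx2, hy0])]
     rw [(by norm_num : ((0:Int)+1) = 1)]
     rw [pv_cf_stop (p1 := some x) (p2 := some y) (c := 1) (by simp [hx0, Ne.symm hx0, hx1, Ne.symm hx1, hx2, Ne.symm hx2, hy0])]
     norm_num [PySem.List.min?, hx0, Ne.symm hx0, hx1, Ne.symm hx1, hx2, Ne.symm hx2, hy0]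
     done)
  | (rw [pv_cf_stop (p1 := some x) (p2 := some y) (c := 0) (by simp [hx0, Ne.symm hx0, hx1, Ne.symm hx1, hx2, Ne.symm hx2, hy1])]
     norm_num [PySem.List.min?, hx0, Ne.symm hx0, hx1, Ne.symm hx1, hx2, Ne.symm hx2, hy1]
     done)
  | (rw [pv_cf_stop (p1 := some x) (p2 := some y) (c := 0) (by simp [hx0, Ne.symm hx0, hx1, Ne.symm hx1, hx2, Ne.symm hx2, hy2])]
     norm_num [PySem.List.min?, hx0, Ne.symm hx0, hx1, Ne.symm hx1, hx2, Ne.symm hx2, hy2]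
     done)
  | (rw [pv_cf_stop (p1 := some x) (p2 := some y) (c := 0) (by simp [hx0, Ne.symm hx0, hx1, Ne.symm hx1, hx2, Ne.symm hx2, hy0, Ne.symm hy0, hy1, Ne.symm hy1, hy2, Ne.symm hy2])]
     norm_num [PySem.List.min?, hx0, Ne.symm hx0, hx1, Ne.symm hx1, hx2, Ne.symm hx2, hy0, Ne.symm hy0, hy1, Ne.symm hy1, hy2, Ne.symm hy2]
     done)

lemma pv_getD_take {C : List Int} {m j : Nat} (h : j < m) :
    (C.take m).getD j 0 = C.getD j 0 := by
  simp [List.getD_eq_getElem?_getD, List.getElem?_take, h]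

-- the fill phases of A and the append-style fill agree
lemma pv_fill_core (n : Nat) : ∀ (fuel : Nat) (C out : List Int), C.length = n →
    out.length + fuel = n → C.take out.length = out →
    (PySem.List.pyRange (out.length : Int) (n : Int)).foldl
      (fun B j => PySem.List.pySetD B j (pvMinFill (PySem.List.slice B (some (max (j-2) 0)) (some j)))) C
      = pvFillB n out := by
  intro fuel
  induction fuel with
  | zero =>
    intro C out hC hlen htake
    rw [PySem.List.pyRange_one_eq_nil (by omega), List.foldl_nil]
    rw [pvFillB.eq_def, if_neg (by omega)]
    rw [show out.length = n by omega, show n = C.length from hC.symm, List.take_length] at htake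
    exact htake
  | succ fuel ih =>
    intro C out hC hlen htake
    have hm : out.length < n := by omega
    have hmC : out.length < C.length := by omega
    rw [PySem.List.pyRange_one_cons (by exact_mod_cast hm), List.foldl_cons]
    rw [pv_slice_pair C (out.length : Int) (by positivity) (by exact_mod_cast le_of_lt hmC)]
    have hgag : ∀ j : Nat, j < out.length → C.getD j 0 = out.getD j 0 := by
      intro j hj
      rw [← htake, pv_getD_take hj]
    rw [pvFillB.eq_def, if_pos hm]
    have hset : PySem.List.pySetD C ((out.length : Nat) : Int)
        (pvMinFill (if 2 ≤ ((out.length : Nat) : Int) then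
            [C.getD (((out.length : Nat) : Int).toNat - 2) 0, C.getD (((out.length : Nat) : Int).toNat - 1) 0]
          else if 1 ≤ ((out.length : Nat) : Int) then [C.getD 0 0] else []))
        = C.set out.length (pvMinFill (if 2 ≤ ((out.length : Nat) : Int) then
            [C.getD (out.length - 2) 0, C.getD (out.length - 1) 0]
          else if 1 ≤ ((out.length : Nat) : Int) then [C.getD 0 0] else [])) := by
      rw [PySem.List.pySetD_natCast]
      congr 2 <;> simp
    rw [hset]
    have hval : (pvMinFill (if 2 ≤ ((out.length : Nat) : Int) then
            [C.getD (out.length - 2) 0, C.getD (out.length - 1) 0]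
          else if 1 ≤ ((out.length : Nat) : Int) then [C.getD 0 0] else []))
        = pvCFill (pvLast1 out) (pvLast2 out) 0 := by
      unfold pvLast1 pvLast2
      rcases Nat.lt_or_ge out.length 1 with h1 | h1
      · rw [if_neg (by omega), if_neg (by omega), if_neg (by omega), if_neg (by omega)]
        exact pv_fill_val_00.symm
      rcases Nat.lt_or_ge out.length 2 with h2 | h2
      · have he : out.length = 1 := by omega
        rw [if_neg (by omega), if_pos (by omega), if_pos (by omega), if_neg (by omega)]
        rw [pv_gd _ _ (by omega), hgag 0 (by omega)]
        rw [show ((out.length : Int) - 1).toNat = 0 by omega]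
        exact (pv_fill_val_10 _).symm
      · rw [if_pos (by exact_mod_cast h2), if_pos (by omega), if_pos (by omega)]
        rw [pv_gd _ _ (by omega), pv_gd _ _ (by omega)]
        rw [show ((out.length : Int) - 1).toNat = out.length - 1 by omega,
            show ((out.length : Int) - 2).toNat = out.length - 2 by omega]
        rw [hgag (out.length - 2) (by omega), hgag (out.length - 1) (by omega)]
        exact (pv_fill_val_11 _ _).symm
    rw [hval]
    set c := pvCFill (pvLast1 out) (pvLast2 out) 0 with hc
    have := ih (C.set out.length c) (out ++ [c])
      (by simpa using hC) (by simpa using by omega : (out ++ [c]).length + fuel = n)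
      (by
        have : (C.set out.length c).take (out.length + 1) = C.take out.length ++ [c] :=
          pv_take_succ hmC (by simp) (fun j hj => pv_getD_set_ne _ _ _ _ (by omega))
            (pv_getD_set_self _ _ _ hmC)
        simpa [htake] using this)
    rw [← this]
    congr 1
    simp

-- ===== VERDICT (by name: the statement is the Claim_ definition above) =====
theorem smallestBeautifulString_spec : Claim_equal_smallestBeautifulString := by
  intro s k _ hpre
  unfold Spec_smallestBeautifulString smallestBeautifulString smallestBeautifulString_alt
  have hne : s.toList ≠ [] := by
    intro hnil
    apply hpre
    have := congrArg String.ofList hnil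
    simpa using this
  set L : List Int := s.toList.map (fun c => (c.toNat : Int) - 97) with hLdef
  have hDig : pvDigits s = L := rfl
  have hlen : 0 < L.length := by
    rw [hLdef]
    simpa using List.length_pos_iff.mpr hne
  rw [hDig]
  have hm : ((L.length : Int) - 1).toNat = L.length - 1 := by omega
  have hC0 : pvIncr L ((L.length : Int) - 1) = L.set (L.length - 1) (L.getD (L.length - 1) 0 + 1) := by
    unfold pvIncr
    rw [PySem.List.pySetD_of_nonneg _ _ (by omega), pv_gd _ _ (by omega), hm]
  have hrel := pv_pivot_core k (pvIncr L ((L.length : Int) - 1)) ((L.length : Int) - 1) L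
    (by rw [hC0]; simp)
    (by omega) (by omega)
    (by intro j hj
        rw [hC0, pv_getD_set_ne _ _ _ _ (by omega)])
    (by rw [hC0, hm, pv_getD_set_self _ _ _ (by omega)])
  rw [pv_pivot_eq] at hrel
  rcases hA : pvLoopA k (pvIncr L ((L.length : Int) - 1)) ((L.length : Int) - 1) with - | ⟨C', i₀⟩ <;>
    rcases hB : pvPivotB k L ((L.length : Int) - 1) with - | ⟨i₁, w⟩ <;>
      rw [hA, hB] at hrel
  · exact hrel.elim
  · exact hrel.elim
  · obtain ⟨hii, hi0, hiu, hClen, htake⟩ := hrel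
    subst hii
    show String.ofList ((pvFillA (L.length : Int) C' i₀).map (fun a => Char.ofNat (97 + a).toNat)) = _
    simp only []
    have hout_len : (L.take i₀.toNat ++ [w]).length = i₀.toNat + 1 := by
      simp
      omega
    have hfill : pvFillA (L.length : Int) C' i₀ = pvFillB L.length (L.take i₀.toNat ++ [w]) := by
      unfold pvFillA
      rw [show (i₀ + 1 : Int) = (((L.take i₀.toNat ++ [w]).length : Nat) : Int) by
        rw [hout_len]; push_cast; omega]
      exact pv_fill_core L.length (L.length - (i₀.toNat + 1)) C' (L.take i₀.toNat ++ [w])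
        hClen (by rw [hout_len]; omega) (by rw [hout_len]; exact htake)
    have hslice : PySem.List.slice L none (some i₀) = L.take i₀.toNat :=
      PySem.List.slice_to _ hi0
    have hl1 : pvLast1 (L.take i₀.toNat ++ [w]) = some w := by
      unfold pvLast1
      rw [if_pos (by rw [hout_len]; omega)]
      congr 1
      rw [pv_gd _ _ (by rw [hout_len]; push_cast; omega)]
      rw [hout_len]
      rw [show (((i₀.toNat + 1 : Nat) : Int) - 1).toNat = i₀.toNat by omega]
      simp [List.getD_eq_getElem?_getD, List.getElem?_append_right,
        show (L.take i₀.toNat).length = i₀.toNat by simp; omega]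
    have hl2 : pvLast2 (L.take i₀.toNat ++ [w]) =
        (if 1 ≤ i₀ then some (PySem.List.pyGetD L (i₀-1) 0) else none) := by
      unfold pvLast2
      rcases lt_or_ge i₀ 1 with h1 | h1
      · rw [if_neg (by rw [hout_len]; omega), if_neg (by omega)]
      · rw [if_pos (by rw [hout_len]; omega), if_pos h1]
        rw [pv_gd _ _ (by rw [hout_len]; push_cast; omega), pv_gd _ _ (by omega)]
        congr 1
        rw [hout_len, show (((i₀.toNat + 1 : Nat) : Int) - 2).toNat = i₀.toNat - 1 by omega,
            show (i₀ - 1).toNat = i₀.toNat - 1 by omega]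
        rw [List.getD_eq_getElem?_getD, List.getD_eq_getElem?_getD,
            List.getElem?_append_left (by simp; omega), List.getElem?_take_of_lt (by omega)]
    have hgen := pv_fillB_gen L.length (L.length - (i₀.toNat + 1)) (L.take i₀.toNat ++ [w])
      (by rw [hout_len]; omega)
    rw [hfill, hgen, hl1, hl2, pv_gen_tile, hslice]
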